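-- pv_equiv track=rewrite | github.com/Alsewedy/ai-agent-network-model | agents/agent_v6.py | collect_keyword_snippets
-- ===== SOURCE A (Python) =====
-- def short_context_snippet(text: str, keyword: str, window: int = 600) -> str:
--     if not text or not keyword:
--         return ""
--
--     lower_text = text.lower()
--     idx = lower_text.find(keyword.lower())
--     if idx == -1:
--         return ""
--
--     start = max(0, idx - 140)
--     end = min(len(text), idx + window)
--     return text[start:end].strip()
--
-- def collect_keyword_snippets(
--     text: str,
--     keywords: list[str],
--     max_snippets: int = 3,
--     window: int = 600
-- ) -> list[str]:
--     if not text: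
--         return []
--
--     snippets = []
--     seen = set()
--
--     for keyword in keywords:
--         if not keyword:
--             continue
--
--         snippet = short_context_snippet(text, keyword, window=window)
--         if not snippet:
--             continue
--
--         key = snippet[:220]
--         if key in seen:
--             continue
--
--         seen.add(key)
--         snippets.append(snippet)
--
--         if len(snippets) >= max_snippets:
--             break
--
--     return snippets
-- ===== SOURCE B (Python) =====
-- def collect_keyword_snippets(
--     text: str,
--     keywords: list[str],
--     max_snippets: int = 3,
--     window: int = 600
-- ) -> list[str]:
--     if not text:
--         return []
--
--     low = text.lower()
--     n = len(text)
--
--     # stage 1: the distinct lowered non-empty keywords, and their distinct lengths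
--     pending = {kw.lower() for kw in keywords if kw}
--     lens = sorted({len(k) for k in pending})
--
--     # stage 2: ONE left-to-right scan over the text positions (hash-set
--     # multi-pattern matching): at each position, for each distinct keyword
--     # length L, the window low[i:i+L] is looked up in the pending set, so each
--     # keyword's first-occurrence index is recorded; the scan stops early once
--     # every keyword has been found
--     found = {}
--     for i in range(n):
--         if not pending:
--             break
--         for L in lens:
--             cand = low[i:i+L]
--             if cand in pending:
--                 found[cand] = i
--                 pending.discard(cand)
--
--     # stage 3: assemble snippets in keyword order, dedupe by 220-char prefix, cap
--     snippets = []
--     seen = set()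
--     for kw in keywords:
--         k = kw.lower()
--         if not k or k not in found:
--             continue
--         i = found[k]
--         snippet = text[max(0, i - 140):min(n, i + window)].strip()
--         if not snippet:
--             continue
--         key = snippet[:220]
--         if key in seen:
--             continue
--         seen.add(key)
--         snippets.append(snippet)
--         if len(snippets) >= max_snippets:
--             break
--     return snippets
-- ===== Notes on version B (the rewrite author's own statement) =====
-- stated objective: alternative
-- what changed: B replaces A's keyword-major per-keyword lowered str.find with a staged text-major algorithm: it builds the set of distinct lowered keywords and the set of their distinct lengths once, then makes ONE left-to-right scan over the text doing hash-set multi-pattern matching (at each position, each distinct length's window is looked up in the pending set, with early exit once all keywords are found) to record every keyword's first occurrence, and only then assembles the deduped, capped snippet list from that table.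
import Mathlib
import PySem

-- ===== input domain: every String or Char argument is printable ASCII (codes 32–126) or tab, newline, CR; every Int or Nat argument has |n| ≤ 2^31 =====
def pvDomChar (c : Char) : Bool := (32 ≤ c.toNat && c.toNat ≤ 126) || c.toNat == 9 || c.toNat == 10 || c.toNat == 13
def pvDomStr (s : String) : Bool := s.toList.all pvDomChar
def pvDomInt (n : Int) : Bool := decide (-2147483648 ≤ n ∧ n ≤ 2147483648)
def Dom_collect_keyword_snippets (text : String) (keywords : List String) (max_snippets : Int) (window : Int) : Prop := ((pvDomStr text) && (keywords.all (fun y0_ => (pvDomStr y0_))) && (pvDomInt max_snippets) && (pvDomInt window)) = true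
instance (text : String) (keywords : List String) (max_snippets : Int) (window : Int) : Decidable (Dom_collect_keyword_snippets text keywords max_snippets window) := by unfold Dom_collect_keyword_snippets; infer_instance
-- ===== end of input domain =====

-- B replaces A's per-keyword lowered find with a staged text-major algorithm: dedup the lowered
-- keywords into a set once, then one left-to-right scan over the text (hash-set multi-pattern
-- matching: per position, each distinct keyword length's window is looked up in the pending set,
-- with early exit) records every keyword's first occurrence, and the snippet list is assembled last.


-- ===== PORT A =====
def short_context_snippet (text : String) (keyword : String) (window : Int) : String :=
  if text = "" ∨ keyword = "" then ""
  else
    let lower_text := PySem.Str.lower text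
    let idx := PySem.Str.find lower_text (PySem.Str.lower keyword)
    if idx = -1 then ""
    else
      let start := max 0 (idx - 140)
      let stop := min (PySem.Str.len text) (idx + window)
      PySem.Str.strip (PySem.Str.slice text (some start) (some stop))

def cksA_go (text : String) (max_snippets window : Int) :
    List String → List String → PySem.Set String → List String
  | [], snippets, _ => snippets
  | kw :: rest, snippets, seen =>
    if kw = "" then cksA_go text max_snippets window rest snippets seen
    else
      let snippet := short_context_snippet text kw window
      if snippet = "" then cksA_go text max_snippets window rest snippets seen
      else
        let key := PySem.Str.slice snippet none (some 220)
        if PySem.Set.contains seen key then cksA_go text max_snippets window rest snippets seen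
        else
          let seen' := PySem.Set.add seen key
          let snippets' := snippets ++ [snippet]
          if max_snippets ≤ (snippets'.length : Int) then snippets'
          else cksA_go text max_snippets window rest snippets' seen'

def collect_keyword_snippets (text : String) (keywords : List String) (max_snippets : Int) (window : Int) : List String :=
  if text = "" then []
  else cksA_go text max_snippets window keywords [] PySem.Set.empty

-- ===== PORT B =====
-- stage 1: the set of distinct lowered non-empty keywords
def mk_pending : List String → PySem.Set String → PySem.Set String
  | [], acc => acc
  | kw :: rest, acc =>
    if kw = "" then mk_pending rest acc
    else mk_pending rest (PySem.Set.add acc (PySem.Str.lower kw))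

-- stage 2 inner loop: at one text position, look up each distinct length's window in the pending set
def pos_step (low : String) (i : Int) (lens : List Int)
    (pending : PySem.Set String) (found : PySem.Dict String Int) :
    PySem.Set String × PySem.Dict String Int :=
  lens.foldl
    (fun st L =>
      let cand := PySem.Str.slice low (some i) (some (i + L))
      if PySem.Set.contains st.1 cand then (PySem.Set.discard st.1 cand, st.2.insert cand i)
      else st)
    (pending, found)

-- stage 2 outer loop over the text positions, with the early break
def scan (low : String) (lens : List Int) :
    List Int → PySem.Set String → PySem.Dict String Int → PySem.Dict String Int
  | [], _, found => found
  | i :: rest, pending, found =>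
    if pending = PySem.Set.empty then found
    else
      let st := pos_step low i lens pending found
      scan low lens rest st.1 st.2

-- stage 3: assemble snippets in keyword order, dedupe by 220-char prefix, cap
def cksB_build (text : String) (n max_snippets window : Int) (found : PySem.Dict String Int) :
    List String → List String → PySem.Set String → List String
  | [], snippets, _ => snippets
  | kw :: rest, snippets, seen =>
    let k := PySem.Str.lower kw
    if k = "" then cksB_build text n max_snippets window found rest snippets seen
    else
      match found.get? k with
      | none => cksB_build text n max_snippets window found rest snippets seen
      | some i =>
        let snippet := PySem.Str.strip (PySem.Str.slice text (some (max 0 (i - 140))) (some (min n (i + window))))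
        if snippet = "" then cksB_build text n max_snippets window found rest snippets seen
        else
          let key := PySem.Str.slice snippet none (some 220)
          if PySem.Set.contains seen key then cksB_build text n max_snippets window found rest snippets seen
          else
            let snippets' := snippets ++ [snippet]
            if max_snippets ≤ (snippets'.length : Int) then snippets'
            else cksB_build text n max_snippets window found rest snippets' (PySem.Set.add seen key)

def collect_keyword_snippets_alt (text : String) (keywords : List String) (max_snippets : Int) (window : Int) : List String :=
  if text = "" then []
  else
    let low := PySem.Str.lower text
    let n := PySem.Str.len text
    let pending := mk_pending keywords PySem.Set.empty
    let lens := PySem.List.sorted (PySem.Set.ofList (pending.map PySem.Str.len)) (fun L => L) false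
    let found := scan low lens (PySem.List.pyRange 0 n 1) pending PySem.Dict.empty
    cksB_build text n max_snippets window found keywords [] PySem.Set.empty

-- ===== PRECONDITION & SPEC =====
def Spec_collect_keyword_snippets (text : String) (keywords : List String) (max_snippets : Int) (window : Int) (out : List String) : Prop := out = collect_keyword_snippets_alt text keywords max_snippets window
instance (text : String) (keywords : List String) (max_snippets : Int) (window : Int) (out : List String) : Decidable (Spec_collect_keyword_snippets text keywords max_snippets window out) := by unfold Spec_collect_keyword_snippets; infer_instance

-- ===== CLAIM (what is proved, stated in full; the proofs are below) =====
def Claim_equal_collect_keyword_snippets : Prop := ∀ (text : String) (keywords : List String) (max_snippets : Int) (window : Int), Dom_collect_keyword_snippets text keywords max_snippets window → Spec_collect_keyword_snippets text keywords max_snippets window (collect_keyword_snippets text keywords max_snippets window)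

-- ===== LEMMAS AND PROOFS =====

-- lower preserves emptiness
lemma lower_eq_empty_iff (s : String) : PySem.Str.lower s = "" ↔ s = "" := by
  constructor
  · intro h
    have h2 : (PySem.Str.lower s).toList = [] := by rw [h]; rfl
    rw [PySem.Str.toList_lower] at h2
    have h3 : (PySem.Chars.lower s.toList).length = s.toList.length := by
      simp [PySem.Chars.lower]
    rw [h2] at h3
    exact String.toList_eq_nil_iff.mp (List.eq_nil_of_length_eq_zero h3.symm)
  · intro h; subst h; decide

-- B's per-position match test is 'the keyword is a prefix of the lowered text dropped at i'
lemma hit_iff (low k : String) (i : Int) (hi : 0 ≤ i) :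
    PySem.Str.slice low (some i) (some (i + PySem.Str.len k)) = k ↔
      k.toList <+: low.toList.drop i.toNat := by
  rw [← String.toList_inj, PySem.Str.toList_slice, PySem.Chars.slice_eq_listSlice,
    PySem.Str.len_eq, PySem.List.slice_toNat low.toList hi (by omega)]
  have hlen : (i + (k.toList.length : Int)).toNat - i.toNat = k.toList.length := by omega
  rw [hlen, List.prefix_iff_eq_take]
  exact eq_comm

-- a non-empty keyword that occurs at all occurs strictly before the end of the text
lemma find_lt_len (low k : String) (hk : k ≠ "") (h : PySem.Str.find low k ≠ -1) :
    PySem.Str.find low k < (low.toList.length : Int) := by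
  rw [PySem.Str.find_eq] at h ⊢
  have h0 : 0 ≤ PySem.Chars.find low.toList k.toList := by
    have := PySem.Chars.neg_one_le_find low.toList k.toList
    omega
  have hle := PySem.Chars.find_le_length low.toList k.toList
  rcases lt_or_eq_of_le hle with hlt | heq
  · exact hlt
  · exfalso
    have hpre := (PySem.Chars.find_spec h0).1
    rw [heq] at hpre
    simp only [Int.toNat_natCast, List.drop_length, List.prefix_nil] at hpre
    exact hk (String.toList_eq_nil_iff.mp hpre)

-- once no occurrence lies before i, a match at position i is exactly 'the first occurrence is i'
lemma hit_iff_find_eq (low k : String) (i : Int) (hi : 0 ≤ i)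
    (hinv : PySem.Str.find low k = -1 ∨ i ≤ PySem.Str.find low k) :
    (PySem.Str.slice low (some i) (some (i + PySem.Str.len k)) = k) ↔
      PySem.Str.find low k = i := by
  rw [hit_iff low k i hi, PySem.Str.find_eq] at *
  constructor
  · intro hpre
    have hIn : PySem.Chars.isIn k.toList low.toList = true :=
      (PySem.Chars.exists_prefix_drop_iff_isIn k.toList low.toList).mp ⟨i.toNat, hpre⟩
    have h0 : 0 ≤ PySem.Chars.find low.toList k.toList :=
      (PySem.Chars.find_nonneg_iff low.toList k.toList).mpr
        ((PySem.Chars.isIn_iff_infix k.toList low.toList).mp hIn)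
    obtain ⟨-, hmin⟩ := PySem.Chars.find_spec h0
    have hle : (PySem.Chars.find low.toList k.toList).toNat ≤ i.toNat := by
      by_contra hlt
      exact hmin i.toNat (by omega) hpre
    omega
  · intro hF
    have h0 : 0 ≤ PySem.Chars.find low.toList k.toList := by omega
    have hpre := (PySem.Chars.find_spec h0).1
    rw [hF] at hpre
    exact hpre

-- the position-i match condition the scan's set lookups realise for a keyword k
def pvCatch (low : String) (i : Int) (lens : List Int) (k : String) : Prop :=
  ∃ L ∈ lens, PySem.Str.slice low (some i) (some (i + L)) = k

lemma pvCatch_cons (low : String) (i L : Int) (ls : List Int) (k : String) :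
    pvCatch low i (L :: ls) k ↔
      PySem.Str.slice low (some i) (some (i + L)) = k ∨ pvCatch low i ls k := by
  simp [pvCatch]

-- when k's own length is among the probed lengths, being caught is exactly matching at i
lemma catch_iff_hit (low k : String) (i : Int) (hi : 0 ≤ i) (lens : List Int)
    (hlen : PySem.Str.len k ∈ lens) (hpos : ∀ L ∈ lens, 0 ≤ L) :
    pvCatch low i lens k ↔
      PySem.Str.slice low (some i) (some (i + PySem.Str.len k)) = k := by
  constructor
  · rintro ⟨L, hL, hslice⟩
    rw [hit_iff low k i hi]
    have h0L := hpos L hL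
    have hk : k.toList = List.take ((i + L).toNat - i.toNat) (List.drop i.toNat low.toList) := by
      rw [← String.toList_inj, PySem.Str.toList_slice, PySem.Chars.slice_eq_listSlice,
        PySem.List.slice_toNat low.toList hi (by omega)] at hslice
      exact hslice.symm
    rw [hk]
    exact List.take_prefix _ _
  · intro h
    exact ⟨PySem.Str.len k, hlen, h⟩

-- the inner fold of scan: caught keywords leave the pending set and map to i
lemma pos_step_spec (low : String) (i : Int) :
    ∀ (lens : List Int) (P : PySem.Set String) (F : PySem.Dict String Int),
      (∀ k, k ∈ (pos_step low i lens P F).1 ↔ k ∈ P ∧ ¬ pvCatch low i lens k)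
      ∧ (∀ k, (k ∈ P ∧ pvCatch low i lens k → (pos_step low i lens P F).2.get? k = some i)
            ∧ (¬ (k ∈ P ∧ pvCatch low i lens k) → (pos_step low i lens P F).2.get? k = F.get? k)) := by
  intro lens
  induction lens with
  | nil =>
    intro P F
    refine ⟨fun k => by simp [pos_step, pvCatch], fun k => ?_⟩
    exact ⟨fun h => absurd h.2 (by simp [pvCatch]), fun _ => rfl⟩
  | cons L ls ih =>
    intro P F
    set cand := PySem.Str.slice low (some i) (some (i + L)) with hcand
    by_cases hc : cand ∈ P
    · have hc' : PySem.Str.slice low (some i) (some (i + L)) ∈ P := by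
        rw [← hcand]; exact hc
      have hstep : pos_step low i (L :: ls) P F
          = pos_step low i ls (PySem.Set.discard P cand) (F.insert cand i) := by
        rw [hcand]
        simp only [pos_step, List.foldl_cons, if_pos ((PySem.Set.contains_iff P _).mpr hc')]
      obtain ⟨ihm, ihg⟩ := ih (PySem.Set.discard P cand) (F.insert cand i)
      rw [hstep]
      refine ⟨?_, ?_⟩
      · intro k
        rw [ihm k, PySem.Set.mem_discard, pvCatch_cons]
        by_cases hk : k = cand
        · subst hk
          simp [hc]
          exact fun h => (h hcand.symm).elim
        · have hck : ¬ cand = k := fun h => hk h.symm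
          tauto
      · intro k
        constructor
        · intro h
          by_cases hk : k = cand
          · subst hk
            rw [(ihg cand).2
                (by rw [PySem.Set.mem_discard]; rintro ⟨⟨-, hne⟩, -⟩; exact hne rfl),
              PySem.Dict.get?_insert, if_pos rfl]
          · have hck : ¬ cand = k := fun hh => hk hh.symm
            have hcatch : pvCatch low i ls k := by
              have := (pvCatch_cons low i L ls k).mp h.2
              tauto
            exact (ihg k).1 ⟨(PySem.Set.mem_discard P cand k).mpr ⟨h.1, hk⟩, hcatch⟩
        · intro h
          have hk : k ≠ cand := by
            rintro rfl
            exact h ⟨hc, (pvCatch_cons low i L ls cand).mpr (Or.inl hcand.symm)⟩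
          have hno : ¬ (k ∈ PySem.Set.discard P cand ∧ pvCatch low i ls k) := by
            rw [PySem.Set.mem_discard]
            rintro ⟨⟨hm, -⟩, hcat⟩
            exact h ⟨hm, (pvCatch_cons low i L ls k).mpr (Or.inr hcat)⟩
          rw [(ihg k).2 hno, PySem.Dict.get?_insert, if_neg hk]
    · have hc' : PySem.Str.slice low (some i) (some (i + L)) ∉ P := by
        rw [← hcand]; exact hc
      have hstep : pos_step low i (L :: ls) P F = pos_step low i ls P F := by
        simp only [pos_step, List.foldl_cons,
          if_neg (fun h => hc' ((PySem.Set.contains_iff P _).mp h))]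
      obtain ⟨ihm, ihg⟩ := ih P F
      rw [hstep]
      have hcand_iff : ∀ k, (k ∈ P ∧ pvCatch low i (L :: ls) k) ↔ (k ∈ P ∧ pvCatch low i ls k) := by
        intro k
        rw [pvCatch_cons]
        constructor
        · rintro ⟨hm, hcat | hcat⟩
          · rw [← hcat] at hm
            exact absurd hm hc
          · exact ⟨hm, hcat⟩
        · rintro ⟨hm, hcat⟩
          exact ⟨hm, Or.inr hcat⟩
      refine ⟨?_, fun k => ⟨fun h => (ihg k).1 ((hcand_iff k).mp h),
        fun h => (ihg k).2 (fun hh => h ((hcand_iff k).mpr hh))⟩⟩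
      intro k
      rw [ihm k, pvCatch_cons]
      by_cases hk : k ∈ P
      · have hck : ¬ cand = k := fun hh => hc (hh ▸ hk)
        tauto
      · tauto

-- the text scan computes every pending keyword's first-occurrence index (no entry if it never occurs)
lemma scan_spec (low : String) (n : Int) (hn : n = (low.toList.length : Int)) (lens : List Int)
    (hpos : ∀ L ∈ lens, 0 ≤ L) :
    ∀ (m : Nat) (i : Int), 0 ≤ i → i ≤ n → (n - i).toNat = m →
    ∀ (P : PySem.Set String) (F : PySem.Dict String Int),
      (∀ k ∈ P, k ≠ "") →
      (∀ k ∈ P, PySem.Str.len k ∈ lens) →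
      (∀ k ∈ P, F.get? k = none ∧
        (PySem.Str.find low k = -1 ∨ i ≤ PySem.Str.find low k)) →
      ∀ k, (scan low lens (PySem.List.pyRange i n 1) P F).get? k
        = if k ∈ P then
            (if PySem.Str.find low k = -1 then none else some (PySem.Str.find low k))
          else F.get? k := by
  intro m
  induction m with
  | zero =>
    intro i hi0 hin hm P F hne hlen hinv k
    have hni : n ≤ i := by omega
    rw [show PySem.List.pyRange i n 1 = [] by simp [PySem.List.pyRange]; omega]
    simp only [scan]
    by_cases hkP : k ∈ P
    · rw [if_pos hkP]
      obtain ⟨hFk, hfind⟩ := hinv k hkP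
      rcases hfind with h | h
      · rw [if_pos h, hFk]
      · exfalso
        have hlt := find_lt_len low k (hne k hkP) (by omega)
        omega
    · rw [if_neg hkP]
  | succ m ih =>
    intro i hi0 hin hm P F hne hlen hinv k
    have hilt : i < n := by omega
    rw [PySem.List.pyRange_one_cons hilt]
    simp only [scan]
    by_cases hP : P = PySem.Set.empty
    · rw [if_pos hP]
      rw [if_neg (by simp [hP, PySem.Set.empty])]
    · rw [if_neg hP]
      obtain ⟨hmemb, hget⟩ := pos_step_spec low i lens P F
      -- hypotheses for the recursive call on the shrunken pending set
      have hne' : ∀ k' ∈ (pos_step low i lens P F).1, k' ≠ "" :=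
        fun k' hk' => hne k' ((hmemb k').mp hk').1
      have hlen' : ∀ k' ∈ (pos_step low i lens P F).1, PySem.Str.len k' ∈ lens :=
        fun k' hk' => hlen k' ((hmemb k').mp hk').1
      have hinv' : ∀ k' ∈ (pos_step low i lens P F).1,
          (pos_step low i lens P F).2.get? k' = none ∧
          (PySem.Str.find low k' = -1 ∨ i + 1 ≤ PySem.Str.find low k') := by
        intro k' hk'
        obtain ⟨hmem, hnocatch⟩ := (hmemb k').mp hk'
        obtain ⟨hFk, hfind⟩ := hinv k' hmem
        refine ⟨by rw [(hget k').2 (by tauto), hFk], ?_⟩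
        rcases hfind with h | h
        · exact Or.inl h
        · right
          have hnohit : ¬ PySem.Str.slice low (some i) (some (i + PySem.Str.len k')) = k' :=
            fun hh => hnocatch ((catch_iff_hit low k' i hi0 lens (hlen k' hmem) hpos).mpr hh)
          have : PySem.Str.find low k' ≠ i := fun heq =>
            hnohit ((hit_iff_find_eq low k' i hi0 (Or.inr h)).mpr heq)
          omega
      have hrec := ih (i + 1) (by omega) (by omega) (by omega)
        (pos_step low i lens P F).1 (pos_step low i lens P F).2 hne' hlen' hinv' k
      rw [hrec]
      by_cases hkP' : k ∈ (pos_step low i lens P F).1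
      · rw [if_pos hkP', if_pos ((hmemb k).mp hkP').1]
      · rw [if_neg hkP']
        by_cases hkP : k ∈ P
        · rw [if_pos hkP]
          have hcatch : pvCatch low i lens k := by
            by_contra hno
            exact hkP' ((hmemb k).mpr ⟨hkP, hno⟩)
          rw [(hget k).1 ⟨hkP, hcatch⟩]
          have hhit := (catch_iff_hit low k i hi0 lens (hlen k hkP) hpos).mp hcatch
          have hfeq : PySem.Str.find low k = i :=
            (hit_iff_find_eq low k i hi0 (hinv k hkP).2).mp hhit
          rw [if_neg (by omega), hfeq]
        · rw [if_neg hkP, (hget k).2 (by tauto)]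

-- mk_pending: the accumulator is preserved
lemma mk_pending_acc_sub : ∀ (kws : List String) (acc : PySem.Set String) (k : String),
    k ∈ acc → k ∈ mk_pending kws acc := by
  intro kws
  induction kws with
  | nil => intro acc k h; exact h
  | cons kw rest ih =>
    intro acc k h
    simp only [mk_pending]
    split
    · exact ih acc k h
    · exact ih _ k ((PySem.Set.mem_add acc (PySem.Str.lower kw) k).mpr (Or.inl h))

-- mk_pending: every non-empty keyword's lowering is collected
lemma mk_pending_mem : ∀ (kws : List String) (acc : PySem.Set String) (kw : String),
    kw ∈ kws → kw ≠ "" → PySem.Str.lower kw ∈ mk_pending kws acc := by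
  intro kws
  induction kws with
  | nil => intro acc kw h; exact absurd h (List.not_mem_nil)
  | cons kw' rest ih =>
    intro acc kw hmem hne
    rcases List.mem_cons.mp hmem with heq | hmem'
    · subst heq
      simp only [mk_pending, if_neg hne]
      exact mk_pending_acc_sub rest _ _
        ((PySem.Set.mem_add acc (PySem.Str.lower kw) _).mpr (Or.inr rfl))
    · simp only [mk_pending]
      split
      · exact ih acc kw hmem' hne
      · exact ih _ kw hmem' hne

-- mk_pending: everything collected is non-empty
lemma mk_pending_ne : ∀ (kws : List String) (acc : PySem.Set String),
    (∀ a ∈ acc, a ≠ "") → ∀ k ∈ mk_pending kws acc, k ≠ "" := by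
  intro kws
  induction kws with
  | nil => intro acc h; exact h
  | cons kw rest ih =>
    intro acc hacc
    simp only [mk_pending]
    split
    · exact ih acc hacc
    · next hkw =>
      refine ih _ ?_
      intro a ha
      rcases (PySem.Set.mem_add acc (PySem.Str.lower kw) a).mp ha with h | h
      · exact hacc a h
      · subst h
        exact fun h => hkw ((lower_eq_empty_iff kw).mp h)

-- stage 3 equals A's loop, given the first-occurrence table
lemma build_eq (text : String) (htext : text ≠ "") (max_snippets window : Int)
    (found : PySem.Dict String Int) :
    ∀ (kws : List String),
      (∀ kw ∈ kws, kw ≠ "" →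
        found.get? (PySem.Str.lower kw) =
          if PySem.Str.find (PySem.Str.lower text) (PySem.Str.lower kw) = -1 then none
          else some (PySem.Str.find (PySem.Str.lower text) (PySem.Str.lower kw))) →
      ∀ (snippets : List String) (seen : PySem.Set String),
        cksA_go text max_snippets window kws snippets seen
          = cksB_build text (PySem.Str.len text) max_snippets window found kws snippets seen := by
  intro kws
  induction kws with
  | nil => intro _ _ _; rfl
  | cons kw rest ih =>
    intro hfound snippets seen
    have hfr : ∀ kw' ∈ rest, kw' ≠ "" →
        found.get? (PySem.Str.lower kw') =
          if PySem.Str.find (PySem.Str.lower text) (PySem.Str.lower kw') = -1 then none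
          else some (PySem.Str.find (PySem.Str.lower text) (PySem.Str.lower kw')) :=
      fun kw' h => hfound kw' (List.mem_cons_of_mem _ h)
    simp only [cksA_go, cksB_build]
    by_cases hkw : kw = ""
    · rw [if_pos hkw, if_pos ((lower_eq_empty_iff kw).mpr hkw)]
      exact ih hfr snippets seen
    · rw [if_neg hkw, if_neg (fun h => hkw ((lower_eq_empty_iff kw).mp h))]
      have hf := hfound kw List.mem_cons_self hkw
      have hsnip : short_context_snippet text kw window
          = (if PySem.Str.find (PySem.Str.lower text) (PySem.Str.lower kw) = -1 then ""
             else PySem.Str.strip (PySem.Str.slice text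
               (some (max 0 (PySem.Str.find (PySem.Str.lower text) (PySem.Str.lower kw) - 140)))
               (some (min (PySem.Str.len text) (PySem.Str.find (PySem.Str.lower text) (PySem.Str.lower kw) + window))))) := by
        simp only [short_context_snippet]
        rw [if_neg (by simp [htext, hkw])]
      by_cases hidx : PySem.Str.find (PySem.Str.lower text) (PySem.Str.lower kw) = -1
      · rw [if_pos hidx] at hf
        rw [hf]
        rw [hsnip, if_pos hidx] at *
        rw [if_pos rfl]
        exact ih hfr snippets seen
      · rw [if_neg hidx] at hf
        rw [hf]
        simp only []
        rw [hsnip, if_neg hidx]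
        set idx := PySem.Str.find (PySem.Str.lower text) (PySem.Str.lower kw) with hidxdef
        set snip := PySem.Str.strip (PySem.Str.slice text
            (some (max 0 (idx - 140))) (some (min (PySem.Str.len text) (idx + window)))) with hsnipdef
        by_cases hs : snip = ""
        · rw [if_pos hs, if_pos hs]
          exact ih hfr snippets seen
        · rw [if_neg hs, if_neg hs]
          by_cases hseen : PySem.Set.contains seen (PySem.Str.slice snip none (some 220)) = true
          · rw [if_pos hseen, if_pos hseen]
            exact ih hfr snippets seen
          · rw [if_neg hseen, if_neg hseen]
            by_cases hfull : max_snippets ≤ ((snippets ++ [snip]).length : Int)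
            · rw [if_pos hfull, if_pos hfull]
            · rw [if_neg hfull, if_neg hfull]
              exact ih hfr _ _

-- ===== VERDICT (by name: the statement is the Claim_ definition above) =====
theorem collect_keyword_snippets_spec : Claim_equal_collect_keyword_snippets := by
  intro text keywords max_snippets window _
  unfold Spec_collect_keyword_snippets collect_keyword_snippets collect_keyword_snippets_alt
  by_cases htext : text = ""
  · simp [htext]
  · simp only [htext, if_false]
    apply build_eq text htext max_snippets window _ keywords
    intro kw hkw hne
    have hn : PySem.Str.len text = ((PySem.Str.lower text).toList.length : Int) := by
      rw [PySem.Str.len_eq, PySem.Str.toList_lower]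
      congr 1
      simp [PySem.Chars.lower]
    have hmem : PySem.Str.lower kw ∈ mk_pending keywords PySem.Set.empty :=
      mk_pending_mem keywords PySem.Set.empty kw hkw hne
    have hlens : ∀ k ∈ mk_pending keywords PySem.Set.empty,
        PySem.Str.len k ∈ PySem.List.sorted
          (PySem.Set.ofList ((mk_pending keywords PySem.Set.empty).map PySem.Str.len))
          (fun L => L) false := by
      intro k hk
      rw [PySem.List.mem_sorted, PySem.Set.mem_ofList]
      exact List.mem_map_of_mem hk
    have hpos : ∀ L ∈ PySem.List.sorted
        (PySem.Set.ofList ((mk_pending keywords PySem.Set.empty).map PySem.Str.len))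
        (fun L => L) false, 0 ≤ L := by
      intro L hL
      rw [PySem.List.mem_sorted, PySem.Set.mem_ofList, List.mem_map] at hL
      obtain ⟨k, -, rfl⟩ := hL
      rw [PySem.Str.len_eq]
      positivity
    have h := scan_spec (PySem.Str.lower text) (PySem.Str.len text) hn
      (PySem.List.sorted
        (PySem.Set.ofList ((mk_pending keywords PySem.Set.empty).map PySem.Str.len))
        (fun L => L) false) hpos
      (PySem.Str.len text).toNat 0 le_rfl
      (by rw [hn]; positivity) (by omega)
      (mk_pending keywords PySem.Set.empty) PySem.Dict.empty
      (mk_pending_ne keywords PySem.Set.empty (by simp [PySem.Set.empty]))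
      hlens
      (by
        intro k _
        refine ⟨PySem.Dict.get?_empty k, ?_⟩
        have := PySem.Chars.neg_one_le_find (PySem.Str.lower text).toList k.toList
        rw [PySem.Str.find_eq]
        omega)
      (PySem.Str.lower kw)
    rw [h, if_pos hmem]
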